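-- pv_equiv track=rewrite | github.com/Mahmoud-ABK/NLP-but-in-arabic | 2-data-extraction/archive/extract_llm/arpd.py | _region_from_indices
-- ===== SOURCE A (Python) =====
-- from typing import List, Pattern, Optional
--
-- def _region_from_indices(lines: List[str], idxs: List[int], radius: int = 2) -> str:
--     if not idxs:
--         return ""
--     keep = set()
--     for i in idxs:
--         for j in range(max(0, i - radius), min(len(lines), i + radius + 1)):
--             keep.add(j)
--     return "\n".join(lines[i] for i in sorted(keep)).strip()
-- ===== SOURCE B (Python) =====
-- def _region_from_indices(lines, idxs, radius=2):
--     picked = [line for j, line in enumerate(lines)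
--               if any(i - radius <= j <= i + radius for i in idxs)]
--     return "\n".join(picked).strip()
-- ===== Notes on version B (the rewrite author's own statement) =====
-- stated objective: simpler
-- what changed: Instead of marking a set of indices per-idx and sorting it, B does one left-to-right pass over the lines keeping each line whose index is within radius of some idx, so the set, the nested range loop and the sort disappear.
import Mathlib
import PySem

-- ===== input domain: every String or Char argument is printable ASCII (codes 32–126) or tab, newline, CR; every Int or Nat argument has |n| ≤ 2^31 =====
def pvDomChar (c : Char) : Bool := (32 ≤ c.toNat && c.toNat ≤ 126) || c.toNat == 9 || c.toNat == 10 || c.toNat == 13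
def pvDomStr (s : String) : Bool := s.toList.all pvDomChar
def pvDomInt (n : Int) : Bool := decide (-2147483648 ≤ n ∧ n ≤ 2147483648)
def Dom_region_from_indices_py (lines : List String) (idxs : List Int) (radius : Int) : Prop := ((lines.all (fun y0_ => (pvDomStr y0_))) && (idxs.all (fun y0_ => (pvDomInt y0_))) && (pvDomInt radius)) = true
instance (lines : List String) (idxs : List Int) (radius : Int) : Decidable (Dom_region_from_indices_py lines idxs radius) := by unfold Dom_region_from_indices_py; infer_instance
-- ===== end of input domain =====

-- B replaces A's set-marking + sort by a single in-order pass over the lines testing a distance predicate; objective: simpler.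

-- ===== PORT A =====
def region_from_indices_py (lines : List String) (idxs : List Int) (radius : Int) : String :=
  if idxs = [] then ""
  else
    let keep : PySem.Set Int :=
      idxs.foldl (fun keep i =>
        (PySem.List.pyRange (max 0 (i - radius)) (min (lines.length : Int) (i + radius + 1)) 1).foldl
          (fun keep j => PySem.Set.add keep j) keep) PySem.Set.empty
    PySem.Str.strip (PySem.Str.join "\n"
      ((PySem.List.sorted keep (fun x => x) false).map (fun i => PySem.List.pyGetD lines i "")))

-- ===== PORT B =====
def region_from_indices_py_alt (lines : List String) (idxs : List Int) (radius : Int) : String :=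
  let picked : List String :=
    ((PySem.List.enumerate lines 0).filter
      (fun p => idxs.any (fun i => decide (i - radius ≤ p.1 ∧ p.1 ≤ i + radius)))).map (fun p => p.2)
  PySem.Str.strip (PySem.Str.join "\n" picked)

-- ===== PRECONDITION & SPEC =====
def Spec_region_from_indices_py (lines : List String) (idxs : List Int) (radius : Int) (out : String) : Prop := out = region_from_indices_py_alt lines idxs radius
instance (lines : List String) (idxs : List Int) (radius : Int) (out : String) : Decidable (Spec_region_from_indices_py lines idxs radius out) := by unfold Spec_region_from_indices_py; infer_instance

-- ===== CLAIM (what is proved, stated in full; the proofs are below) =====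
def Claim_equal_region_from_indices_py : Prop := ∀ (lines : List String) (idxs : List Int) (radius : Int), Dom_region_from_indices_py lines idxs radius → Spec_region_from_indices_py lines idxs radius (region_from_indices_py lines idxs radius)

-- ===== LEMMAS AND PROOFS =====

-- the set built by A's two nested loops, as a function
def pvKeep (lines : List String) (idxs : List Int) (radius : Int) : PySem.Set Int :=
  idxs.foldl (fun keep i =>
    (PySem.List.pyRange (max 0 (i - radius)) (min (lines.length : Int) (i + radius + 1)) 1).foldl
      (fun keep j => PySem.Set.add keep j) keep) PySem.Set.empty

-- folding Set.add over a list only adds its elements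
theorem pv_mem_foldl_add {l : List Int} {s : PySem.Set Int} {x : Int} :
    x ∈ l.foldl (fun s j => PySem.Set.add s j) s ↔ x ∈ s ∨ x ∈ l := by
  induction l generalizing s with
  | nil => simp
  | cons a l ih => simp [List.foldl_cons, ih, PySem.Set.mem_add]; tauto

theorem pv_nodup_foldl_add {l : List Int} {s : PySem.Set Int} (hs : s.Nodup) :
    (l.foldl (fun s j => PySem.Set.add s j) s).Nodup := by
  induction l generalizing s with
  | nil => exact hs
  | cons a l ih => exact ih (by simpa using PySem.Set.nodup_add s a hs)

theorem pv_mem_keep_aux (lines : List String) (radius : Int) (x : Int) (idxs : List Int) :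
    ∀ s : PySem.Set Int,
      (x ∈ idxs.foldl (fun keep i =>
        (PySem.List.pyRange (max 0 (i - radius)) (min (lines.length : Int) (i + radius + 1)) 1).foldl
          (fun keep j => PySem.Set.add keep j) keep) s
      ↔ x ∈ s ∨ ∃ i ∈ idxs, max 0 (i - radius) ≤ x ∧ x < min (lines.length : Int) (i + radius + 1)) := by
  induction idxs with
  | nil => simp
  | cons a l ih =>
    intro s
    simp only [List.foldl_cons, ih, pv_mem_foldl_add, PySem.List.mem_pyRange_one, List.mem_cons]
    constructor
    · rintro ((h | h) | h)
      · exact Or.inl h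
      · exact Or.inr ⟨a, Or.inl rfl, h⟩
      · obtain ⟨i, hi, hb⟩ := h; exact Or.inr ⟨i, Or.inr hi, hb⟩
    · rintro (h | ⟨i, (rfl | hi), hb⟩)
      · exact Or.inl (Or.inl h)
      · exact Or.inl (Or.inr hb)
      · exact Or.inr ⟨i, hi, hb⟩

theorem pv_mem_keep (lines : List String) (idxs : List Int) (radius : Int) (x : Int) :
    x ∈ pvKeep lines idxs radius ↔
      ∃ i ∈ idxs, max 0 (i - radius) ≤ x ∧ x < min (lines.length : Int) (i + radius + 1) := by
  unfold pvKeep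
  rw [pv_mem_keep_aux]
  simp [PySem.Set.empty]

theorem pv_nodup_keep (lines : List String) (idxs : List Int) (radius : Int) :
    (pvKeep lines idxs radius).Nodup := by
  unfold pvKeep
  have : ∀ (l : List Int) (s : PySem.Set Int), s.Nodup →
      (l.foldl (fun keep i =>
        (PySem.List.pyRange (max 0 (i - radius)) (min (lines.length : Int) (i + radius + 1)) 1).foldl
          (fun keep j => PySem.Set.add keep j) keep) s).Nodup := by
    intro l
    induction l with
    | nil => intro s hs; exact hs
    | cons a l ih => intro s hs; exact ih _ (pv_nodup_foldl_add hs)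
  exact this idxs PySem.Set.empty (by simp [PySem.Set.empty])

-- ===== VERDICT (by name: the statement is the Claim_ definition above) =====
-- B's filter over the enumerated lines, restated as a filter over the index range
theorem pv_alt_eq (lines : List String) (idxs : List Int) (radius : Int) :
    region_from_indices_py_alt lines idxs radius =
      PySem.Str.strip (PySem.Str.join "\n"
        (((PySem.List.pyRange 0 (lines.length : Int) 1).filter
            (fun j => idxs.any (fun i => decide (i - radius ≤ j ∧ j ≤ i + radius)))).map
          (fun j => PySem.List.pyGetD lines j ""))) := by
  unfold region_from_indices_py_alt
  rw [PySem.List.enumerate_eq_map_pyRange lines ""]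
  rw [List.filter_map, List.map_map]
  rfl

-- the ordered index list A visits is that same filtered range
theorem pv_sorted_keep_eq (lines : List String) (idxs : List Int) (radius : Int) :
    PySem.List.sorted (pvKeep lines idxs radius) (fun x => x) false =
      (PySem.List.pyRange 0 (lines.length : Int) 1).filter
        (fun j => idxs.any (fun i =>
          decide (max 0 (i - radius) ≤ j ∧ j < min (lines.length : Int) (i + radius + 1)))) := by
  apply PySem.List.sorted_eq_of_perm_of_pairwise_lt
  · rw [List.perm_ext_iff_of_nodup (List.Nodup.filter _ (PySem.List.nodup_pyRange_one _ _))
        (pv_nodup_keep lines idxs radius)]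
    intro x
    rw [pv_mem_keep]
    simp only [List.mem_filter, PySem.List.mem_pyRange_one, List.any_eq_true,
      decide_eq_true_eq]
    constructor
    · rintro ⟨-, i, hi, hb⟩; exact ⟨i, hi, hb⟩
    · rintro ⟨i, hi, hb⟩; exact ⟨⟨by omega, by omega⟩, i, hi, hb⟩
  · exact List.Pairwise.filter _ (PySem.List.pairwise_lt_pyRange_one _ _)

-- the two filter predicates agree on in-range indices
theorem pv_filters_eq (lines : List String) (idxs : List Int) (radius : Int) :
    (PySem.List.pyRange 0 (lines.length : Int) 1).filter
        (fun j => idxs.any (fun i =>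
          decide (max 0 (i - radius) ≤ j ∧ j < min (lines.length : Int) (i + radius + 1)))) =
      (PySem.List.pyRange 0 (lines.length : Int) 1).filter
        (fun j => idxs.any (fun i => decide (i - radius ≤ j ∧ j ≤ i + radius))) := by
  apply List.filter_congr
  intro j hj
  rw [PySem.List.mem_pyRange_one] at hj
  rw [Bool.eq_iff_iff]
  simp only [List.any_eq_true, decide_eq_true_eq]
  constructor
  · rintro ⟨i, hi, hb⟩; exact ⟨i, hi, by omega⟩
  · rintro ⟨i, hi, hb⟩; exact ⟨i, hi, by omega⟩

-- ===== VERDICT (by name: the statement is the Claim_ definition above) =====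
theorem region_from_indices_py_spec : Claim_equal_region_from_indices_py := by
  intro lines idxs radius _
  unfold Spec_region_from_indices_py region_from_indices_py
  rw [pv_alt_eq]
  by_cases h : idxs = []
  · subst h
    rw [if_pos rfl]
    have : (PySem.List.pyRange 0 (lines.length : Int) 1).filter
        (fun j => ([] : List Int).any (fun i => decide (i - radius ≤ j ∧ j ≤ i + radius))) = [] := by
      simp
    rw [this]
    rfl
  · rw [if_neg h]
    show PySem.Str.strip (PySem.Str.join "\n"
        ((PySem.List.sorted (pvKeep lines idxs radius) (fun x => x) false).map
          (fun i => PySem.List.pyGetD lines i ""))) = _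
    rw [pv_sorted_keep_eq, pv_filters_eq]
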